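-- pv_equiv track=rewrite | github.com/code-rag-bench/code-rag-bench | preprocessor/devdocs/search_docs.py | truncate_doc_content
-- ===== SOURCE A (Python) =====
-- def truncate_doc_content(text: str) -> str:
--     lines = text.split('\n')
--
--     # truncate when examples start
--     def trim_examples(lines: list[str]) -> list[str]:
--         example_index = len(lines)
--         for i,l in enumerate(lines):
--             if l.startswith(">>>"):
--                 example_index = i
--                 break
--         return lines[: example_index]
--
--     if len(lines) > 5:
--         lines = trim_examples(lines)
--
--     # truncate when function listing start
--     listing_index = len(lines)
--     def is_list_function(text: str) -> bool:
--         return len(text.split()) and len(text.split()[0].split('.')) == 2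
--
--     for i, l in enumerate(lines):
--         if i>2 and is_list_function(l):
--             listing_index = i
--             break
--     lines = lines[: listing_index]
--
--     if len(lines) > 10:
--         lines = lines[: 3]
--     return '\n'.join(lines)
-- ===== SOURCE B (Python) =====
-- def truncate_doc_content(text: str) -> str:
--     lines = text.split('\n')
--     gate = len(lines) > 5
--     out = []
--     for i, l in enumerate(lines):
--         if gate and l.startswith('>>>'):
--             break
--         if i > 2:
--             words = l.split()
--             if words and len(words[0].split('.')) == 2:
--                 break
--         out.append(l)
--     if len(out) > 10:
--         out = out[:3]
--     return '\n'.join(out)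
-- ===== Notes on version B (the rewrite author's own statement) =====
-- stated objective: alternative
-- what changed: Replaces A's index-computing structure (a helper scan producing a cut index, a slice, a second indexed scan of the trimmed list, another slice) by a streaming loop that emits lines one by one into the output and stops at the first stopping line, never computing a cut index or slicing for the cuts.
import Mathlib
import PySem

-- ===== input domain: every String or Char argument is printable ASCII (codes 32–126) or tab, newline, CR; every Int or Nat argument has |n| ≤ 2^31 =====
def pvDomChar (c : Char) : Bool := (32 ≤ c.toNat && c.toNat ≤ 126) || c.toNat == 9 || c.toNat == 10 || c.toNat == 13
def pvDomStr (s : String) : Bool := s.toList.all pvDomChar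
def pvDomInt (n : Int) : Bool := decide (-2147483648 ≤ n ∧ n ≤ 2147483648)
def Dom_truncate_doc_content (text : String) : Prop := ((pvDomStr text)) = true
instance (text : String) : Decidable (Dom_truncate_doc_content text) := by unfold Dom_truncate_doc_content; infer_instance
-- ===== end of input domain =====

-- A computes cut indices by scans and slices the list twice; B is a streaming loop that
-- emits lines into the output and stops at the first stopping line, computing no cut
-- index and doing no slicing for the cuts (objective: alternative decomposition).

-- ===== PORT A =====
-- is_list_function: len(text.split()) and len(text.split()[0].split('.')) == 2
def pvIsListFunction (s : String) : Bool :=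
  match PySem.Str.split₀ s with
  | [] => false
  | w :: _ => ((PySem.Str.split? w ".").getD []).length == 2

-- the loop of trim_examples: first index whose line startswith ">>>", default len(lines)
def pvTrimIdx : List String → Nat
  | [] => 0
  | l :: ls => if PySem.Str.startswith l ">>>" then 0 else pvTrimIdx ls + 1

-- the listing loop: first index i>2 with is_list_function, default len(lines); i is the counter
def pvListIdx (i : Nat) : List String → Nat
  | [] => 0
  | l :: ls => if decide (i > 2) && pvIsListFunction l then 0 else pvListIdx (i + 1) ls + 1

def truncate_doc_content (text : String) : String :=
  let lines := (PySem.Str.split? text "\n").getD []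
  let lines := if lines.length > 5 then lines.take (pvTrimIdx lines) else lines
  let lines := lines.take (pvListIdx 0 lines)
  let lines := if lines.length > 10 then lines.take 3 else lines
  PySem.Str.join "\n" lines

-- ===== PORT B =====
-- B's streaming loop: emit each line until a stopping line, then stop (the break);
-- k is the enumerate counter, gate = len(lines) > 5 (computed once, before the loop)
def pvKeep (gate : Bool) : Nat → List String → List String
  | _, [] => []
  | k, l :: ls =>
    if gate && PySem.Str.startswith l ">>>" then []
    else if decide (k > 2) &&
        (match PySem.Str.split₀ l with
         | [] => false
         | w :: _ => ((PySem.Str.split? w ".").getD []).length == 2) then []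
    else l :: pvKeep gate (k + 1) ls

def truncate_doc_content_alt (text : String) : String :=
  let lines := (PySem.Str.split? text "\n").getD []
  let gate := decide (lines.length > 5)
  let out := pvKeep gate 0 lines
  let out := if out.length > 10 then out.take 3 else out
  PySem.Str.join "\n" out

-- ===== PRECONDITION & SPEC =====
def Spec_truncate_doc_content (text : String) (out : String) : Prop := out = truncate_doc_content_alt text
instance (text : String) (out : String) : Decidable (Spec_truncate_doc_content text out) := by unfold Spec_truncate_doc_content; infer_instance

-- ===== CLAIM =====
def Claim_equal_truncate_doc_content : Prop := ∀ (text : String), Dom_truncate_doc_content text → Spec_truncate_doc_content text (truncate_doc_content text)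

-- ===== LEMMAS AND PROOFS =====

lemma pvTrimIdx_le (ls : List String) : pvTrimIdx ls ≤ ls.length := by
  induction ls with
  | nil => simp [pvTrimIdx]
  | cons l ls ih => unfold pvTrimIdx; split; · simp
                    · simp only [List.length_cons]; omega

lemma pvListIdx_le (ls : List String) : ∀ k, pvListIdx k ls ≤ ls.length := by
  induction ls with
  | nil => intro k; simp [pvListIdx]
  | cons l ls ih => intro k; unfold pvListIdx; split; · simp
                    · have := ih (k + 1); simp only [List.length_cons]; omega

-- the listing index of a truncated list
lemma pvListIdx_take (ls : List String) : ∀ (k e : Nat),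
    pvListIdx k (ls.take e) = min (pvListIdx k ls) (min e ls.length) := by
  induction ls with
  | nil => intro k e; simp [pvListIdx]
  | cons l ls ih =>
    intro k e
    cases e with
    | zero => simp [pvListIdx]
    | succ e' =>
      rw [List.take_succ_cons]
      unfold pvListIdx
      split
      · simp
      · rw [ih (k + 1) e']
        simp only [List.length_cons]
        omega

-- A's two sequential truncations produce the prefix up to the minimum of the two cuts
lemma truncation_eq (ls : List String) :
    (if ls.length > 5 then ls.take (pvTrimIdx ls) else ls).take
      (pvListIdx 0 (if ls.length > 5 then ls.take (pvTrimIdx ls) else ls)) =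
    ls.take (min (if ls.length > 5 then pvTrimIdx ls else ls.length) (pvListIdx 0 ls)) := by
  have hL := pvTrimIdx_le ls
  have hf := pvListIdx_le ls 0
  by_cases h5 : ls.length > 5
  · simp only [if_pos h5]
    rw [pvListIdx_take, List.take_take]
    congr 1
    omega
  · simp only [if_neg h5]
    congr 1
    omega

-- B's streaming loop produces the prefix up to the minimum of the two cuts
lemma pvTrimIdx_cons (l : String) (ls : List String) :
    pvTrimIdx (l :: ls) = if PySem.Str.startswith l ">>>" then 0 else pvTrimIdx ls + 1 := rfl

lemma pvListIdx_cons (k : Nat) (l : String) (ls : List String) :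
    pvListIdx k (l :: ls) = if decide (k > 2) && pvIsListFunction l then 0 else pvListIdx (k + 1) ls + 1 := rfl

lemma keep_eq_take (gate : Bool) (ls : List String) : ∀ k,
    pvKeep gate k ls =
      ls.take (min (if gate then pvTrimIdx ls else ls.length) (pvListIdx k ls)) := by
  induction ls with
  | nil => intro k; simp [pvKeep]
  | cons l ls ih =>
    intro k
    have hmatch : (match PySem.Str.split₀ l with
         | [] => false
         | w :: _ => ((PySem.Str.split? w ".").getD []).length == 2) = pvIsListFunction l := rfl
    rw [show pvKeep gate k (l :: ls) =
        (if gate && PySem.Str.startswith l ">>>" then []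
         else if decide (k > 2) &&
            (match PySem.Str.split₀ l with
             | [] => false
             | w :: _ => ((PySem.Str.split? w ".").getD []).length == 2) then []
         else l :: pvKeep gate (k + 1) ls) from rfl, hmatch]
    by_cases h1 : (gate && PySem.Str.startswith l ">>>") = true
    · obtain ⟨hg, hs⟩ := Bool.and_eq_true_iff.mp h1
      rw [if_pos h1, hg, if_pos rfl, pvTrimIdx_cons, if_pos hs]
      simp
    · rw [if_neg h1]
      by_cases h2 : (decide (k > 2) && pvIsListFunction l) = true
      · rw [if_pos h2, pvListIdx_cons, if_pos h2]
        simp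
      · rw [if_neg h2, ih (k + 1), pvListIdx_cons, if_neg h2]
        have hX : (if gate = true then pvTrimIdx (l :: ls) else (l :: ls).length) =
            (if gate = true then pvTrimIdx ls else ls.length) + 1 := by
          cases hg : gate with
          | false => simp
          | true =>
            have hs : PySem.Str.startswith l ">>>" = false :=
              Bool.eq_false_iff.mpr (fun h => h1 (by rw [hg, h]; rfl))
            rw [if_pos rfl, if_pos rfl, pvTrimIdx_cons,
                if_neg (by rw [hs]; exact Bool.false_ne_true)]
        rw [hX]
        have hmin : min ((if gate = true then pvTrimIdx ls else ls.length) + 1)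
              (pvListIdx (k + 1) ls + 1)
            = min (if gate = true then pvTrimIdx ls else ls.length) (pvListIdx (k + 1) ls) + 1 := by
          omega
        rw [hmin, List.take_succ_cons]

-- ===== VERDICT =====
theorem truncate_doc_content_spec : Claim_equal_truncate_doc_content := by
  intro text _
  unfold Spec_truncate_doc_content truncate_doc_content truncate_doc_content_alt
  set ls := (PySem.Str.split? text "\n").getD [] with hls
  simp only
  rw [keep_eq_take]
  simp only [decide_eq_true_eq]
  rw [truncation_eq ls]
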